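-- pv_equiv track=rewrite | github.com/Dhein-4938/daily_knowledge | scripts/read_today.py | strip_h1
-- ===== SOURCE A (Python) =====
-- def strip_h1(body: str) -> str:
--     """Remove the first H1 line if present."""
--     lines = body.splitlines()
--     for i, line in enumerate(lines):
--         stripped = line.lstrip()
--         if stripped.startswith("# ") and not stripped.startswith("## "):
--             lines.pop(i)
--             # Also remove any blank line immediately after
--             if i < len(lines) and lines[i].strip() == "":
--                 lines.pop(i)
--             break
--     return "\n".join(lines)
-- ===== SOURCE B (Python) =====
-- def strip_h1(body: str) -> str:
--     """Remove the first H1 line if present (one forward pass with state flags)."""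
--     out = []
--     removed = False
--     skip_blank = False
--     for line in body.splitlines():
--         if skip_blank:
--             skip_blank = False
--             if line.strip() == "":
--                 continue
--             out.append(line)
--         else:
--             s = line.lstrip()
--             if not removed and s.startswith("# ") and not s.startswith("## "):
--                 removed = True
--                 skip_blank = True
--             else:
--                 out.append(line)
--     return "\n".join(out)
-- ===== Notes on version B (the rewrite author's own statement) =====
-- stated objective: alternative
-- what changed: A finds the first H1 by index, pops it (and a following blank line) from the list and breaks; B never mutates or indexes the list, it builds the output in one forward pass carrying removed/skip_blank state flags.
import Mathlib
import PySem

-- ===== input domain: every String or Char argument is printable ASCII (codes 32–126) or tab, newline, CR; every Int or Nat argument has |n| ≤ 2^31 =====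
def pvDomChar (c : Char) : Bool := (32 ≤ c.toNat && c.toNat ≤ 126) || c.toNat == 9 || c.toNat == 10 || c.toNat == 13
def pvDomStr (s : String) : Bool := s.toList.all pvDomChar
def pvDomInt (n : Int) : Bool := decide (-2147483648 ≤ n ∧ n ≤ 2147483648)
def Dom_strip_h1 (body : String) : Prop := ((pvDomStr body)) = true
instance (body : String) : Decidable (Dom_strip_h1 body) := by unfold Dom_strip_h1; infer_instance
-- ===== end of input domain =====

-- B replaces A's index-based pop-and-break loop by a single forward pass with state flags; objective: alternative decomposition.

-- ===== PORT A =====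
-- A's for-loop with enumerate/pop/break: structural scan; on the first H1 match it drops
-- that line, drops one immediately following blank line, and keeps the remainder unchanged.
def stripH1Loop : List String → List String
  | [] => []
  | l :: rest =>
    let s := PySem.Str.lstrip l
    if PySem.Str.startswith s "# " && !PySem.Str.startswith s "## " then
      -- lines.pop(i); then if lines[i].strip() == "" pop it too; break
      match rest with
      | [] => []
      | r :: rs => if PySem.Str.strip r == "" then rs else r :: rs
    else l :: stripH1Loop rest

def strip_h1 (body : String) : String :=
  PySem.Str.join "\n" (stripH1Loop (PySem.Str.splitlines body))

-- ===== PORT B =====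
-- one forward pass carrying (removed, skip_blank) state, building the output list
def stripH1AltLoop : List String → Bool → Bool → List String
  | [], _, _ => []
  | l :: rest, removed, skip =>
    if skip then
      if PySem.Str.strip l == "" then stripH1AltLoop rest removed false
      else l :: stripH1AltLoop rest removed false
    else
      let s := PySem.Str.lstrip l
      if !removed && (PySem.Str.startswith s "# " && !PySem.Str.startswith s "## ") then
        stripH1AltLoop rest true true
      else l :: stripH1AltLoop rest removed false

def strip_h1_alt (body : String) : String :=
  PySem.Str.join "\n" (stripH1AltLoop (PySem.Str.splitlines body) false false)

-- ===== PRECONDITION & SPEC =====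
def Spec_strip_h1 (body : String) (out : String) : Prop := out = strip_h1_alt body
instance (body : String) (out : String) : Decidable (Spec_strip_h1 body out) := by unfold Spec_strip_h1; infer_instance

-- ===== CLAIM (what is proved, stated in full; the proofs are below) =====
def Claim_equal_strip_h1 : Prop := ∀ (body : String), Dom_strip_h1 body → Spec_strip_h1 body (strip_h1 body)

-- ===== LEMMAS AND PROOFS =====

-- once the H1 is removed and no blank-skip is pending, B copies the rest unchanged
theorem altLoop_done (l : List String) : stripH1AltLoop l true false = l := by
  induction l with
  | nil => rfl
  | cons x xs ih => simp [stripH1AltLoop, ih]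

theorem loop_eq (l : List String) : stripH1AltLoop l false false = stripH1Loop l := by
  induction l with
  | nil => rfl
  | cons x xs ih =>
    by_cases h : PySem.Chars.startswith (PySem.Chars.lstrip x.toList) ['#', ' '] = true ∧
        PySem.Chars.startswith (PySem.Chars.lstrip x.toList) ['#', '#', ' '] = false
    · cases xs with
      | nil => simp [stripH1AltLoop, stripH1Loop, h]
      | cons r rs =>
        by_cases hb : PySem.Str.strip r = ""
        · simp [stripH1AltLoop, stripH1Loop, h, hb, altLoop_done]
        · simp [stripH1AltLoop, stripH1Loop, h, hb, altLoop_done]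
    · simp [stripH1AltLoop, stripH1Loop, h, ih]

-- ===== VERDICT (by name: the statement is the Claim_ definition above) =====
theorem strip_h1_spec : Claim_equal_strip_h1 := by
  intro body _
  unfold Spec_strip_h1 strip_h1 strip_h1_alt
  rw [loop_eq]
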